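-- pv_equiv track=rewrite | github.com/vsur0007/Personal_Projects_Sura | Algorithms and Data Structures/Backtracking_Algortihm.py | restaurantFinder
-- ===== SOURCE A (Python) =====
-- def restaurantFinder(d, site_list):
--     """
--     Function description:
--     This function finds the maximum possible revenue and the sites to visit to achieve this revenue. The function uses a dynamic programming approach to solve the problem.
--
--     Approach description:
--     The function iterates through the list of sites and for each site, it calculates the maximum revenue by either including or excluding the current site. It then backtracks to find the selected sites.
--
--     :Input:
--     d: The minimum distance between any two selected sites.
--     site_list: A list of revenues for each site.
--
--     :Output, return or postcondition:
--     The function returns a tuple where the first element is the maximum possible revenue and the second element is a list of selected sites in ascending order.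
--
--     :Time complexity:
--     O(n), where n is the number of sites.
--
--     :Aux space complexity:
--     O(n), where n is the number of sites.
--     """
--     n = len(site_list)
--
--     # Initializing a list to store the maximum revenue for each site
--     site_sum = [0] * (n + 1)
--
--     # Initializing a list to store the selected sites
--     selected_sites = []
--
--     # Iterating through the sites
--     for i in range(1, n + 1):
--
--         # Calculating the maximum revenue without the current site
--         skip_site_revenue = site_sum[i - 1]
--
--         # Calculating the maximum revenue with the current site
--         include_site_revenue = site_list[i - 1]
--         if i - d - 1 >= 0:
--             include_site_revenue += site_sum[i - d - 1]
--
--         # Updating site_sum with the maximum revenue for the current site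
--         site_sum[i] = max(skip_site_revenue, include_site_revenue)
--
--     # Backtracking to find the selected sites
--     i = n
--     while i > 0:
--
--         # If the current site's revenue is not equal to the previous site's revenue, it means this site was selected
--         if site_sum[i] != site_sum[i - 1]:
--             selected_sites.append(i)
--
--             # Move to the site at least 'd' distance away
--             i -= d + 1
--
--         else:
--             i -= 1
--
--     # Reversing the selected_sites list to ensure it's in ascending order, since the sites are taken in descending order
--     selected_sites.reverse()
--
--     # Calculate the total revenue
--     total_revenue = site_sum[-1]
--
--     return total_revenue, selected_sites
-- ===== SOURCE B (Python) =====
-- def restaurantFinder(d, site_list):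
--     # Forward DP that carries the optimal selection list alongside the sums,
--     # removing A's separate backward reconstruction pass.
--     n = len(site_list)
--     site_sum = [0] * (n + 1)
--     dp = [[] for _ in range(n + 1)]
--     for i in range(1, n + 1):
--         skip = site_sum[i - 1]
--         include = site_list[i - 1]
--         if i - d - 1 >= 0:
--             include += site_sum[i - d - 1]
--         if include > skip:
--             site_sum[i] = include
--             dp[i] = (dp[i - d - 1] + [i]) if i - d - 1 >= 0 else [i]
--         else:
--             site_sum[i] = skip
--             dp[i] = dp[i - 1]
--     return site_sum[n], dp[n]
-- ===== Notes on version B (the rewrite author's own statement) =====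
-- stated objective: alternative
-- what changed: B carries the optimal selection list forward inside the DP loop (dp[i] = dp[i-1] or dp[i-d-1]+[i]), eliminating A's separate backward while-loop reconstruction pass.
-- outside the precondition, e.g. on restaurantFinder(-1, [0, -2]): A returns (0, []), B returns (0, []); on restaurantFinder(-1, [0, 3]): A does not finish within the time limit, B returns (3, [2])
import Mathlib
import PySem

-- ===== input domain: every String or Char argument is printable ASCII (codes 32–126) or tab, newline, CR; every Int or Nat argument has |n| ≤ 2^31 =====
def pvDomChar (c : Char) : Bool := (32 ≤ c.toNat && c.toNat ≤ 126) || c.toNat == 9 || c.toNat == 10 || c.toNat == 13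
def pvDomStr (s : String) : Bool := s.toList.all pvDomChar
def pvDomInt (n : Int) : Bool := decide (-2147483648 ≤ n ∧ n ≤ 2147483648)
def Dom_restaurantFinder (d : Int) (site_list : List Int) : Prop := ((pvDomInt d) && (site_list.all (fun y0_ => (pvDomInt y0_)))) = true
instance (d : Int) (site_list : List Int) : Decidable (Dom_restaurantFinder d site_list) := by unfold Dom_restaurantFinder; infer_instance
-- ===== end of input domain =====

-- B replaces A's backward while-loop reconstruction by carrying the optimal
-- selection list forward inside the DP loop (objective: alternative decomposition).

-- ===== PORT A =====
-- one iteration of A's forward DP loop (body of 'for i in range(1, n+1)');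
-- reads use List.getD: inside Pre_ (0 ≤ d) every index is in range, so this is exact
def stepA (d : Int) (sl : List Int) (ss : List Int) (i : Int) : List Int :=
  let skip := ss.getD (i - 1).toNat 0
  let incl := sl.getD (i - 1).toNat 0 + (if 0 ≤ i - d - 1 then ss.getD (i - d - 1).toNat 0 else 0)
  ss.set i.toNat (max skip incl)

-- A's backtracking 'while i > 0' loop; fuel n+1 bounds the iteration count,
-- which suffices since inside Pre_ (0 ≤ d) i strictly decreases each step
def backA (sums : List Int) (d : Int) : Nat → Int → List Int → List Int
  | 0, _, acc => acc
  | fuel + 1, i, acc =>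
    if 0 < i then
      if sums.getD i.toNat 0 ≠ sums.getD (i - 1).toNat 0 then
        backA sums d fuel (i - d - 1) (acc ++ [i])
      else
        backA sums d fuel (i - 1) acc
    else acc

def restaurantFinder (d : Int) (site_list : List Int) : Int × List Int :=
  let n := site_list.length
  let site_sum := (PySem.List.pyRange 1 ((n : Int) + 1) 1).foldl (stepA d site_list) (List.replicate (n + 1) 0)
  let selected := backA site_sum d (n + 1) (n : Int) []
  -- site_sum[-1] is the last element of a list of length n+1, i.e. index n
  (site_sum.getD n 0, selected.reverse)

-- ===== PORT B =====
-- one iteration of B's single forward loop: state = (site_sum, dp)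
def stepB (d : Int) (sl : List Int) (st : List Int × List (List Int)) (i : Int) : List Int × List (List Int) :=
  let skip := st.1.getD (i - 1).toNat 0
  let incl := sl.getD (i - 1).toNat 0 + (if 0 ≤ i - d - 1 then st.1.getD (i - d - 1).toNat 0 else 0)
  if skip < incl then
    (st.1.set i.toNat incl,
     st.2.set i.toNat ((if 0 ≤ i - d - 1 then st.2.getD (i - d - 1).toNat [] else []) ++ [i]))
  else
    (st.1.set i.toNat skip, st.2.set i.toNat (st.2.getD (i - 1).toNat []))

def restaurantFinder_alt (d : Int) (site_list : List Int) : Int × List Int :=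
  let n := site_list.length
  let st := (PySem.List.pyRange 1 ((n : Int) + 1) 1).foldl (stepB d site_list)
              (List.replicate (n + 1) 0, List.replicate (n + 1) [])
  (st.1.getD n 0, st.2.getD n [])

-- ===== PRECONDITION & SPEC =====
-- Pre_ excludes negative d (with a nonempty list): there A raises IndexError (d ≤ -2)
-- or loops forever (d = -1 once some prefix revenue is positive); on the degenerate
-- negative-d inputs where A still returns ((d, []) or d = -1 with no positive revenue,
-- value (0, [])) B returns the same value, but they lie outside Pre_ for this reason.
def Pre_restaurantFinder (d : Int) (site_list : List Int) : Prop := 0 ≤ d ∨ site_list = []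
instance (d : Int) (site_list : List Int) : Decidable (Pre_restaurantFinder d site_list) := by unfold Pre_restaurantFinder; infer_instance
def pvWitness_restaurantFinder : Int × List Int := (1, [3, -1, 5])
def Spec_restaurantFinder (d : Int) (site_list : List Int) (out : Int × List Int) : Prop := out = restaurantFinder_alt d site_list
instance (d : Int) (site_list : List Int) (out : Int × List Int) : Decidable (Spec_restaurantFinder d site_list out) := by unfold Spec_restaurantFinder; infer_instance

-- ===== CLAIM (what is proved, stated in full; the proofs are below) =====
def Claim_equal_restaurantFinder : Prop := ∀ (d : Int) (site_list : List Int), Dom_restaurantFinder d site_list → Pre_restaurantFinder d site_list → Spec_restaurantFinder d site_list (restaurantFinder d site_list)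

-- ===== LEMMAS AND PROOFS =====

-- reference recurrences for the DP value and the selected-site list (proof-only)
def S (dn : Nat) (sl : List Int) : Nat → Int
  | 0 => 0
  | k + 1 => max (S dn sl k) (sl.getD k 0 + if dn ≤ k then S dn sl (k - dn) else 0)
  termination_by k => k
  decreasing_by all_goals omega

def Lsel (dn : Nat) (sl : List Int) : Nat → List Int
  | 0 => []
  | k + 1 =>
    if S dn sl k < sl.getD k 0 + (if dn ≤ k then S dn sl (k - dn) else 0) then
      (if dn ≤ k then Lsel dn sl (k - dn) else []) ++ [((k : Int) + 1)]
    else Lsel dn sl k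
  termination_by k => k
  decreasing_by all_goals omega

theorem getD_set {α : Type} (l : List α) (m : Nat) (v : α) (j : Nat) (x : α) :
    (l.set m v).getD j x = if j = m ∧ m < l.length then v else l.getD j x := by
  simp only [List.getD, List.getElem?_set]
  split_ifs <;> simp_all

theorem getD_replicate {α : Type} (m : Nat) (a : α) (j : Nat) (x : α) :
    (List.replicate m a).getD j x = if j < m then a else x := by
  simp [List.getD, List.getElem?_replicate]
  split_ifs <;> simp_all

def InvS (dn : Nat) (sl : List Int) (n k : Nat) (ss : List Int) : Prop :=
  ss.length = n + 1 ∧ ∀ j ≤ n, ss.getD j 0 = if j ≤ k then S dn sl j else 0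

theorem stepA_inv (d : Int) (hd : 0 ≤ d) (sl ss : List Int) (n k : Nat) (hk : k < n)
    (h : InvS d.toNat sl n k ss) : InvS d.toNat sl n (k + 1) (stepA d sl ss ((k : Int) + 1)) := by
  obtain ⟨hlen, hget⟩ := h
  have e1 : ((k : Int) + 1 - 1).toNat = k := by omega
  have e2 : ((k : Int) + 1).toNat = k + 1 := by omega
  have ec : (0 ≤ (k : Int) + 1 - d - 1) ↔ d.toNat ≤ k := by omega
  have e3 : ((k : Int) + 1 - d - 1).toNat = k - d.toNat := by omega
  constructor
  · simp [stepA]; omega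
  · intro j hj
    simp only [stepA, e1, e2, e3]
    rw [getD_set]
    by_cases h1 : j = k + 1 ∧ k + 1 < ss.length
    · -- j = k+1
      rw [if_pos h1, if_pos (by omega : j ≤ k + 1)]
      have hjk : j = k + 1 := h1.1
      subst hjk
      rw [hget k (by omega), if_pos (le_refl k)]
      by_cases hc : 0 ≤ (k : Int) + 1 - d - 1
      · rw [if_pos hc, hget (k - d.toNat) (by omega), if_pos (by omega), S]
        rw [if_pos (by omega : d.toNat ≤ k)]
      · rw [if_neg hc, S, if_neg (by omega : ¬ d.toNat ≤ k)]
    · -- unchanged entry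
      rw [if_neg h1, hget j hj]
      have hne : ¬ (j = k + 1) := by
        intro he; exact h1 ⟨he, by omega⟩
      by_cases hjk : j ≤ k
      · rw [if_pos hjk, if_pos (by omega : j ≤ k + 1)]
      · rw [if_neg hjk, if_neg (by omega : ¬ j ≤ k + 1)]

theorem foldA_inv (d : Int) (hd : 0 ≤ d) (sl : List Int) (n : Nat) :
    ∀ k, k ≤ n → InvS d.toNat sl n k
      ((PySem.List.pyRange 1 ((k : Int) + 1) 1).foldl (stepA d sl) (List.replicate (n + 1) 0)) := by
  intro k
  induction k with
  | zero =>
    intro _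
    have : PySem.List.pyRange 1 ((0 : Nat) + 1 : Int) 1 = [] := by
      rw [PySem.List.pyRange_one]; norm_num
    rw [this, List.foldl_nil]
    constructor
    · simp
    · intro j hj
      rw [getD_replicate, if_pos (by omega)]
      split_ifs with h
      · have : j = 0 := by omega
        subst this; rw [S]
      · rfl
  | succ k ih =>
    intro hk
    have : ((k + 1 : Nat) : Int) + 1 = (((k : Nat) : Int) + 1) + 1 := by push_cast; ring
    rw [this, PySem.List.pyRange_one_succ_right (by omega : (1 : Int) ≤ (k : Int) + 1), List.foldl_append]
    simp only [List.foldl]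
    exact stepA_inv d hd sl _ n k (by omega) (ih (by omega))

def InvB (dn : Nat) (sl : List Int) (n k : Nat) (st : List Int × List (List Int)) : Prop :=
  InvS dn sl n k st.1 ∧ st.2.length = n + 1 ∧
    ∀ j ≤ n, st.2.getD j [] = if j ≤ k then Lsel dn sl j else []

theorem stepB_inv (d : Int) (hd : 0 ≤ d) (sl : List Int) (n k : Nat) (hk : k < n)
    (st : List Int × List (List Int)) (h : InvB d.toNat sl n k st) :
    InvB d.toNat sl n (k + 1) (stepB d sl st ((k : Int) + 1)) := by
  obtain ⟨⟨hlen, hget⟩, hdlen, hdget⟩ := h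
  have e1 : ((k : Int) + 1 - 1).toNat = k := by omega
  have e2 : ((k : Int) + 1).toNat = k + 1 := by omega
  have e3 : ((k : Int) + 1 - d - 1).toNat = k - d.toNat := by omega
  have hskip : st.1.getD k 0 = S d.toNat sl k := by rw [hget k (by omega), if_pos (le_refl k)]
  have hincl : (if 0 ≤ (k : Int) + 1 - d - 1 then st.1.getD (k - d.toNat) 0 else 0)
      = (if d.toNat ≤ k then S d.toNat sl (k - d.toNat) else 0) := by
    by_cases hc : 0 ≤ (k : Int) + 1 - d - 1
    · rw [if_pos hc, if_pos (by omega), hget (k - d.toNat) (by omega), if_pos (by omega)]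
    · rw [if_neg hc, if_neg (by omega)]
  have hdif : (if 0 ≤ (k : Int) + 1 - d - 1 then st.2.getD (k - d.toNat) [] else [])
      = (if d.toNat ≤ k then st.2.getD (k - d.toNat) [] else []) := by
    by_cases hc : 0 ≤ (k : Int) + 1 - d - 1
    · rw [if_pos hc, if_pos (by omega)]
    · rw [if_neg hc, if_neg (by omega)]
  have hstep : stepB d sl st ((k : Int) + 1)
      = (st.1.set (k + 1) (max (S d.toNat sl k) (sl.getD k 0 + if d.toNat ≤ k then S d.toNat sl (k - d.toNat) else 0)),
         st.2.set (k + 1) (if S d.toNat sl k < sl.getD k 0 + (if d.toNat ≤ k then S d.toNat sl (k - d.toNat) else 0)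
            then (if d.toNat ≤ k then st.2.getD (k - d.toNat) [] else []) ++ [((k : Int) + 1)]
            else st.2.getD k [])) := by
    simp only [stepB, e1, e2, e3, hskip, hincl, hdif]
    by_cases hc : S d.toNat sl k < sl.getD k 0 + (if d.toNat ≤ k then S d.toNat sl (k - d.toNat) else 0)
    · rw [if_pos hc, if_pos hc, max_eq_right (le_of_lt hc)]
    · rw [if_neg hc, if_neg hc, max_eq_left (not_lt.mp hc)]
  have hA : stepA d sl st.1 ((k : Int) + 1)
      = st.1.set (k + 1) (max (S d.toNat sl k) (sl.getD k 0 + if d.toNat ≤ k then S d.toNat sl (k - d.toNat) else 0)) := by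
    simp only [stepA, e1, e2, e3, hskip, hincl]
  rw [hstep]
  refine ⟨?_, ?_, ?_⟩
  · have := stepA_inv d hd sl st.1 n k hk ⟨hlen, hget⟩
    rw [hA] at this
    exact this
  · simp [hdlen]
  · intro j hj
    show (st.2.set (k + 1) _).getD j [] = _
    rw [getD_set]
    by_cases h1 : j = k + 1 ∧ k + 1 < st.2.length
    · rw [if_pos h1, if_pos (by omega : j ≤ k + 1)]
      have hjk : j = k + 1 := h1.1
      subst hjk
      rw [Lsel]
      by_cases hc : S d.toNat sl k < sl.getD k 0 + (if d.toNat ≤ k then S d.toNat sl (k - d.toNat) else 0)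
      · rw [if_pos hc, if_pos hc]
        by_cases hdk : d.toNat ≤ k
        · rw [if_pos hdk, if_pos hdk, hdget (k - d.toNat) (by omega), if_pos (by omega)]
        · rw [if_neg hdk, if_neg hdk]
      · rw [if_neg hc, if_neg hc, hdget k (by omega), if_pos (le_refl k)]
    · rw [if_neg h1, hdget j hj]
      have hne : ¬ (j = k + 1) := by
        intro he; exact h1 ⟨he, by omega⟩
      by_cases hjk : j ≤ k
      · rw [if_pos hjk, if_pos (by omega : j ≤ k + 1)]
      · rw [if_neg hjk, if_neg (by omega : ¬ j ≤ k + 1)]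

theorem foldB_inv (d : Int) (hd : 0 ≤ d) (sl : List Int) (n : Nat) :
    ∀ k, k ≤ n → InvB d.toNat sl n k
      ((PySem.List.pyRange 1 ((k : Int) + 1) 1).foldl (stepB d sl)
        (List.replicate (n + 1) 0, List.replicate (n + 1) [])) := by
  intro k
  induction k with
  | zero =>
    intro _
    have : PySem.List.pyRange 1 ((0 : Nat) + 1 : Int) 1 = [] := by
      rw [PySem.List.pyRange_one]; norm_num
    rw [this, List.foldl_nil]
    refine ⟨⟨by simp, ?_⟩, by simp, ?_⟩
    · intro j hj
      rw [getD_replicate, if_pos (by omega)]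
      split_ifs with h
      · have : j = 0 := by omega
        subst this; rw [S]
      · rfl
    · intro j hj
      rw [getD_replicate, if_pos (by omega)]
      split_ifs with h
      · have : j = 0 := by omega
        subst this; rw [Lsel]
      · rfl
  | succ k ih =>
    intro hk
    have : ((k + 1 : Nat) : Int) + 1 = (((k : Nat) : Int) + 1) + 1 := by push_cast; ring
    rw [this, PySem.List.pyRange_one_succ_right (by omega : (1 : Int) ≤ (k : Int) + 1), List.foldl_append]
    simp only [List.foldl]
    exact stepB_inv d hd sl n k (by omega) _ (ih (by omega))

theorem backA_nonpos (ss : List Int) (d : Int) (fuel : Nat) (i : Int) (acc : List Int)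
    (h : ¬ 0 < i) : backA ss d fuel i acc = acc := by
  cases fuel with
  | zero => rfl
  | succ f => simp [backA, h]

theorem backA_eq (ss : List Int) (d : Int) (hd : 0 ≤ d) (sl : List Int) (n : Nat)
    (hss : ∀ j ≤ n, ss.getD j 0 = S d.toNat sl j) :
    ∀ k, k ≤ n → ∀ fuel, k ≤ fuel → ∀ acc,
      backA ss d fuel (k : Int) acc = acc ++ (Lsel d.toNat sl k).reverse := by
  intro k
  induction k using Nat.strong_induction_on with
  | _ k ih =>
    intro hkn fuel hfuel acc
    cases k with
    | zero => rw [Nat.cast_zero, backA_nonpos ss d fuel 0 acc (by omega), Lsel]; simp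
    | succ k =>
      cases fuel with
      | zero => omega
      | succ f =>
        have e2 : (((k + 1 : Nat) : Int)).toNat = k + 1 := by omega
        have e1 : (((k + 1 : Nat) : Int) - 1).toNat = k := by omega
        rw [backA, if_pos (by push_cast; omega)]
        rw [e2, e1, hss (k + 1) hkn, hss k (by omega)]
        have hS : S d.toNat sl (k + 1)
            = max (S d.toNat sl k) (sl.getD k 0 + if d.toNat ≤ k then S d.toNat sl (k - d.toNat) else 0) := by
          rw [S]
        by_cases hc : S d.toNat sl k < sl.getD k 0 + (if d.toNat ≤ k then S d.toNat sl (k - d.toNat) else 0)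
        · rw [if_pos (by rw [hS]; omega)]
          have harg : ((k + 1 : Nat) : Int) - d - 1 = (k : Int) - d := by push_cast; ring
          rw [harg]
          by_cases hdk : d.toNat ≤ k
          · have : (k : Int) - d = ((k - d.toNat : Nat) : Int) := by omega
            rw [this, ih (k - d.toNat) (by omega) (by omega) f (by omega)]
            rw [Lsel, if_pos hc, if_pos hdk]
            simp
          · rw [backA_nonpos ss d f _ _ (by omega)]
            rw [Lsel, if_pos hc, if_neg hdk]
            simp
        · rw [if_neg (by rw [hS]; omega)]
          have : ((k + 1 : Nat) : Int) - 1 = (k : Int) := by push_cast; ring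
          rw [this, ih k (by omega) (by omega) f (by omega)]
          rw [Lsel, if_neg hc]

-- ===== VERDICT (by name: the statement is the Claim_ definition above) =====
theorem restaurantFinder_spec : Claim_equal_restaurantFinder := by
  intro d sl _ hpre
  show restaurantFinder d sl = restaurantFinder_alt d sl
  rcases hpre with hd | hnil
  · set n := sl.length with hn
    obtain ⟨hlenA, hgetA⟩ := foldA_inv d hd sl n n (le_refl n)
    obtain ⟨⟨hlenB, hgetB⟩, hdlenB, hdgetB⟩ := foldB_inv d hd sl n n (le_refl n)
    have hssS : ∀ j ≤ n, ((PySem.List.pyRange 1 ((n : Int) + 1) 1).foldl (stepA d sl)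
        (List.replicate (n + 1) 0)).getD j 0 = S d.toNat sl j := by
      intro j hj; rw [hgetA j hj, if_pos hj]
    simp only [restaurantFinder, restaurantFinder_alt]
    refine Prod.ext ?_ ?_
    · show _ = _
      rw [hssS n (le_refl n), hgetB n (le_refl n), if_pos (le_refl n)]
    · show (backA _ d (n + 1) (n : Int) []).reverse = _
      rw [backA_eq _ d hd sl n hssS n (le_refl n) (n + 1) (by omega) []]
      rw [hdgetB n (le_refl n), if_pos (le_refl n)]
      simp
  · subst hnil
    simp [restaurantFinder, restaurantFinder_alt, backA]
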